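-- pv_equiv track=rewrite | github.com/eg-abhiyantsingh/Egalvanic_Web-main | .github/scripts/consolidated-report.py | group_by_module
-- ===== SOURCE A (Python) =====
-- from collections import OrderedDict
--
-- MODULE_ORDER = [
--     'Authentication', 'Site Selection', 'Connections', 'Locations', 'Tasks',
--     'Issues', 'Work Orders', 'Asset Management', 'SLD Module',
--     'Dashboard & Bug Verification', 'Bug Hunt & Security',
--     'Load & Performance', 'Critical Path', 'Admin Forms', 'API Tests',
--     'AI Exploratory', 'AI Visual Regression', 'AI Page Analysis',
-- ]
--
-- def group_by_module(tests):
--     """Group tests by module, maintaining MODULE_ORDER."""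
--     modules = OrderedDict()
--
--     # Initialize in preferred order
--     for mod in MODULE_ORDER:
--         modules[mod] = []
--
--     for t in tests:
--         mod = t['module']
--         if mod not in modules:
--             modules[mod] = []
--         modules[mod].append(t)
--
--     # Remove empty modules
--     return OrderedDict((k, v) for k, v in modules.items() if v)
-- ===== SOURCE B (Python) =====
-- from collections import OrderedDict
--
-- MODULE_ORDER = [
--     'Authentication', 'Site Selection', 'Connections', 'Locations', 'Tasks',
--     'Issues', 'Work Orders', 'Asset Management', 'SLD Module',
--     'Dashboard & Bug Verification', 'Bug Hunt & Security',
--     'Load & Performance', 'Critical Path', 'Admin Forms', 'API Tests',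
--     'AI Exploratory', 'AI Visual Regression', 'AI Page Analysis',
-- ]
--
-- def group_by_module(tests):
--     """Group tests by module, maintaining MODULE_ORDER."""
--     seen = []
--     for t in tests:
--         m = t['module']
--         if m not in seen:
--             seen.append(m)
--     order = [m for m in MODULE_ORDER if m in seen] + \
--             [m for m in seen if m not in MODULE_ORDER]
--     return OrderedDict((m, [t for t in tests if t['module'] == m]) for m in order)
-- ===== Notes on version B (the rewrite author's own statement) =====
-- stated objective: alternative
-- what changed: B abandons A's dict accumulator entirely: it first collects the distinct modules in first-appearance order, computes the output ordering (present known modules in MODULE_ORDER order, then unknown modules), and builds each group by filtering the test list per module.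
import Mathlib
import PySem

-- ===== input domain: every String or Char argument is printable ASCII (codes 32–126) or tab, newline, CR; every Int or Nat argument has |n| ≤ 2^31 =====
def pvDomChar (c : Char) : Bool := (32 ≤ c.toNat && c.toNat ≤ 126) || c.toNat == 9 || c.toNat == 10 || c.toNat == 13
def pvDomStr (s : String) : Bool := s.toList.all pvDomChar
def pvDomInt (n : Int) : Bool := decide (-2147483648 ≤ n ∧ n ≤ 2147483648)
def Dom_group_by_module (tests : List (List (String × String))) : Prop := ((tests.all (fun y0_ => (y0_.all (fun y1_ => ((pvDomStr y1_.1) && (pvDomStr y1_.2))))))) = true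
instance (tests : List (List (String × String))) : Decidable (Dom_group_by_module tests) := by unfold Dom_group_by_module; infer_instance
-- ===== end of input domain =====

-- B abandons A's dict accumulator: it collects the distinct modules in first-appearance
-- order, computes the output ordering (present known modules in MODULE_ORDER order, then
-- unknown ones), and builds each group by filtering the test list; objective: alternative.

def pvMODULE_ORDER : List String :=
  ["Authentication", "Site Selection", "Connections", "Locations", "Tasks",
   "Issues", "Work Orders", "Asset Management", "SLD Module",
   "Dashboard & Bug Verification", "Bug Hunt & Security",
   "Load & Performance", "Critical Path", "Admin Forms", "API Tests",
   "AI Exploratory", "AI Visual Regression", "AI Page Analysis"]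

-- ===== PORT A =====
-- modules = OrderedDict(); for mod in MODULE_ORDER: modules[mod] = []
def pvInitA : PySem.Dict String (List (List (String × String))) :=
  pvMODULE_ORDER.foldl (fun d m => d.insert m []) PySem.Dict.empty

-- loop body: mod = t['module'] (KeyError → none); if mod not in modules: modules[mod] = []; modules[mod].append(t)
def pvStepA (d : PySem.Dict String (List (List (String × String)))) (t : List (String × String)) :
    Option (PySem.Dict String (List (List (String × String)))) :=
  ((PySem.Dict.ofList t).get? "module").map (fun mod =>
    (if d.contains mod then d else d.insert mod []).modify mod [] (fun v => v ++ [t]))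

def group_by_module (tests : List (List (String × String))) : List (String × List (List (String × String))) :=
  match tests.foldl (fun od t => od.bind (fun d => pvStepA d t)) (some pvInitA) with
  | none => []   -- a test without a 'module' key: Python raises KeyError; excluded by Pre_
  | some d => d.items.filter (fun p => !p.2.isEmpty)   -- OrderedDict((k,v) … if v)

-- ===== PORT B =====
-- first loop: seen = []; for t in tests: m = t['module']; if m not in seen: seen.append(m)
def pvSeenB (tests : List (List (String × String))) : Option (List String) :=
  tests.foldl (fun acc t => acc.bind (fun seen =>
    ((PySem.Dict.ofList t).get? "module").map (fun m =>
      if seen.contains m then seen else seen ++ [m]))) (some [])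

def group_by_module_alt (tests : List (List (String × String))) : List (String × List (List (String × String))) :=
  match pvSeenB tests with
  | none => []   -- KeyError in Python; excluded by Pre_
  | some seen =>
      (pvMODULE_ORDER.filter (fun m => seen.contains m)
        ++ seen.filter (fun m => !pvMODULE_ORDER.contains m)).map
        (fun m => (m, tests.filter (fun t => (PySem.Dict.ofList t).getD "module" "" == m)))

-- ===== PRECONDITION & SPEC =====
-- Pre_ excludes exactly the tests dicts without a 'module' key, on which Python A raises KeyError.
def Pre_group_by_module (tests : List (List (String × String))) : Prop :=
  ∀ t ∈ tests, "module" ∈ t.map Prod.fst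
instance (tests : List (List (String × String))) : Decidable (Pre_group_by_module tests) := by
  unfold Pre_group_by_module; infer_instance

def pvWitness_group_by_module : (List (List (String × String))) :=
  [[("module", "Tasks"), ("name", "t1")], [("module", "Xyz")], [("module", "Tasks")]]

def Spec_group_by_module (tests : List (List (String × String))) (out : List (String × List (List (String × String)))) : Prop := out = group_by_module_alt tests
instance (tests : List (List (String × String))) (out : List (String × List (List (String × String)))) : Decidable (Spec_group_by_module tests out) := by unfold Spec_group_by_module; infer_instance

-- ===== CLAIM (what is proved, stated in full; the proofs are below) =====
def Claim_equal_group_by_module : Prop := ∀ (tests : List (List (String × String))), Dom_group_by_module tests → Pre_group_by_module tests → Spec_group_by_module tests (group_by_module tests)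

-- ===== LEMMAS AND PROOFS =====

-- the 'module' value of a test (used only by the proofs; Pre_ guarantees the key exists)
def pvKeyOf (t : List (String × String)) : String := (PySem.Dict.ofList t).getD "module" ""

-- A's grouping step, on (key, test) pairs
def pvStep (d : PySem.Dict String (List (List (String × String)))) (p : String × List (String × String)) :
    PySem.Dict String (List (List (String × String))) :=
  d.modify p.1 [] (fun v => v ++ [p.2])

def pvPairs (tests : List (List (String × String))) : List (String × List (String × String)) :=
  tests.map (fun t => (pvKeyOf t, t))

def pvG (tests : List (List (String × String))) (c : String) : String × List (List (String × String)) :=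
  (c, tests.filter (fun t => pvKeyOf t == c))

lemma pv_get?_module (t : List (String × String)) (h : "module" ∈ t.map Prod.fst) :
    (PySem.Dict.ofList t).get? "module" = some (pvKeyOf t) := by
  have hc : (PySem.Dict.ofList t).contains "module" = true := by
    rw [PySem.Dict.contains_iff_mem_keys]
    have hkeys : (PySem.Dict.ofList t).keys = PySem.Set.ofList (t.map Prod.fst) := by
      simp only [PySem.Dict.ofList, PySem.Dict.update]
      rw [PySem.Dict.keys_foldl_insert_key (key := Prod.fst) (f := fun _ x => x.2)]
      simp [PySem.Dict.keys_empty, PySem.Set.update_nil_left]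
    rw [hkeys]
    exact (PySem.Set.mem_ofList _ _).mpr h
  cases hg : (PySem.Dict.ofList t).get? "module" with
  | none => rw [PySem.Dict.contains_eq_isSome_get?, hg] at hc; simp at hc
  | some v => rw [pvKeyOf, PySem.Dict.getD_of_get?_eq_some _ _ hg]

lemma pv_insert_modify (d : PySem.Dict String (List (List (String × String)))) (k : String)
    (f : List (List (String × String)) → List (List (String × String)))
    (h : d.contains k = false) :
    (d.insert k []).modify k [] f = d.modify k [] f := by
  have hk : k ∉ d.keys := by
    intro hm
    rw [← PySem.Dict.contains_iff_mem_keys] at hm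
    simp [h] at hm
  have hmem : ∀ p ∈ d.items, p.1 ≠ k := by
    intro p hp hpk
    exact hk (by simpa [PySem.Dict.keys, hpk] using List.mem_map_of_mem (f := Prod.fst) hp)
  have hg : d.getD k [] = [] := PySem.Dict.getD_of_not_contains d [] h
  have hg2 : (d.insert k []).getD k [] = [] := PySem.Dict.getD_insert_self d k [] []
  simp [PySem.Dict.modify, PySem.Dict.insert, h] at hg2 ⊢
  refine ⟨?_, by rw [hg2, hg]⟩
  calc List.map (fun p => if p.1 = k then (k, f ((PySem.Dict.mk (d.items ++ [(k, [])])).getD k [])) else p) d.items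
      = List.map id d.items := by
        apply List.map_congr_left; intro p hp; simp [hmem p hp]
    _ = d.items := List.map_id d.items

-- A's loop body on a test whose key is known
lemma pv_stepA_eq_step (d : PySem.Dict String (List (List (String × String))))
    (p : String × List (String × String)) :
    (if d.contains p.1 then d else d.insert p.1 []).modify p.1 [] (fun v => v ++ [p.2]) = pvStep d p := by
  cases h : d.contains p.1 with
  | true => simp [pvStep]
  | false => simp [pvStep, pv_insert_modify d p.1 _ h]

lemma pv_foldA (tests : List (List (String × String))) (d0 : PySem.Dict String (List (List (String × String))))
    (h : ∀ t ∈ tests, "module" ∈ t.map Prod.fst) :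
    tests.foldl (fun od t => od.bind (fun d => pvStepA d t)) (some d0)
      = some ((pvPairs tests).foldl pvStep d0) := by
  induction tests generalizing d0 with
  | nil => simp [pvPairs]
  | cons t ts ih =>
      have ht := h t (by simp)
      have hts : ∀ t ∈ ts, "module" ∈ t.map Prod.fst := fun x hx => h x (by simp [hx])
      have hstep : (some d0).bind (fun d => pvStepA d t) = some (pvStep d0 (pvKeyOf t, t)) := by
        simp only [Option.bind_some, pvStepA, pv_get?_module t ht, Option.map_some]
        exact congrArg some (pv_stepA_eq_step d0 (pvKeyOf t, t))
      rw [List.foldl_cons, hstep]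
      simpa [pvPairs, pvStep] using ih _ hts

-- B's first loop builds exactly set(keys) in first-appearance order
lemma pv_seenB (tests : List (List (String × String))) (s : List String)
    (h : ∀ t ∈ tests, "module" ∈ t.map Prod.fst) :
    tests.foldl (fun acc t => acc.bind (fun seen =>
      ((PySem.Dict.ofList t).get? "module").map (fun m =>
        if seen.contains m then seen else seen ++ [m]))) (some s)
      = some (PySem.Set.update s (tests.map pvKeyOf)) := by
  induction tests generalizing s with
  | nil => simp [PySem.Set.update]
  | cons t ts ih =>
      have ht := h t (by simp)
      have hts : ∀ t ∈ ts, "module" ∈ t.map Prod.fst := fun x hx => h x (by simp [hx])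
      rw [List.foldl_cons, Option.bind_some, pv_get?_module t ht, Option.map_some]
      rw [ih _ hts]
      congr 1

-- closed forms of A's grouping fold
lemma pv_fold_keys (l : List (String × List (String × String))) (d0 : PySem.Dict String (List (List (String × String)))) :
    (l.foldl pvStep d0).keys = PySem.Set.update d0.keys (l.map Prod.fst) := by
  exact PySem.Dict.keys_foldl_modify_key l Prod.fst [] (fun _ p => fun v => v ++ [p.2]) d0

lemma pv_fold_nodup (l : List (String × List (String × String))) (d0 : PySem.Dict String (List (List (String × String))))
    (h : d0.keys.Nodup) : (l.foldl pvStep d0).keys.Nodup := by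
  exact PySem.Dict.nodup_keys_foldl_modify_key l Prod.fst [] (fun _ p => fun v => v ++ [p.2]) d0 h

lemma pv_fold_getD (l : List (String × List (String × String))) (d0 : PySem.Dict String (List (List (String × String)))) (c : String) :
    (l.foldl pvStep d0).getD c [] = d0.getD c [] ++ (l.filter (fun p => p.1 == c)).map Prod.snd := by
  exact PySem.Dict.getD_foldl_modify_append l d0 c

lemma pv_getD_nil (xs : List String) (c : String) :
    (PySem.Dict.mk (xs.map (fun m => (m, ([] : List (List (String × String))))))).getD c [] = [] := by
  induction xs with
  | nil => simp [PySem.Dict.getD_eq_get?_getD, PySem.Dict.get?]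
  | cons x xs ih =>
      simp only [List.map_cons, PySem.Dict.getD_eq_get?_getD, PySem.Dict.get?_mk_cons] at ih ⊢
      split <;> simp [ih]

lemma pv_initA_items : pvInitA.items = pvMODULE_ORDER.map (fun m => (m, [])) := by decide

lemma pv_initA_getD (c : String) : pvInitA.getD c [] = [] := by
  rw [PySem.Dict.ext pv_initA_items]
  exact pv_getD_nil pvMODULE_ORDER c

lemma pv_initA_keys : pvInitA.keys = pvMODULE_ORDER := by decide

-- the pairs-side group equals the tests-side filter
lemma pv_group_eq (tests : List (List (String × String))) (c : String) :
    ((pvPairs tests).filter (fun p => p.1 == c)).map Prod.snd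
      = tests.filter (fun t => pvKeyOf t == c) := by
  unfold pvPairs
  rw [List.filter_map, List.map_map]
  simp [Function.comp_def]

lemma pv_group_eq_nil_iff (tests : List (List (String × String))) (c : String) :
    tests.filter (fun t => pvKeyOf t == c) = [] ↔ c ∉ tests.map pvKeyOf := by
  rw [List.filter_eq_nil_iff]
  constructor
  · intro h hc
    obtain ⟨t, ht, htc⟩ := List.mem_map.mp hc
    exact absurd (show (pvKeyOf t == c) = true by simpa using htc) (by simpa using h t ht)
  · intro h t ht
    simp only [Bool.not_eq_true, beq_eq_false_iff_ne, ne_eq]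
    intro htc
    exact h (List.mem_map.mpr ⟨t, ht, htc⟩)

-- ===== VERDICT (by name: the statement is the Claim_ definition above) =====
theorem group_by_module_spec : Claim_equal_group_by_module := by
  intro tests _ hpre
  unfold Spec_group_by_module group_by_module group_by_module_alt pvSeenB
  rw [pv_foldA tests pvInitA hpre, pv_seenB tests [] hpre]
  set mods := tests.map pvKeyOf with hmods
  have hpairs_fst : (pvPairs tests).map Prod.fst = mods := by
    simp [pvPairs, hmods]
  set g : String → String × List (List (String × String)) := pvG tests with hgdef
  have hMOnodup : pvMODULE_ORDER.Nodup := by decide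
  have hGAnodup : ((pvPairs tests).foldl pvStep pvInitA).keys.Nodup :=
    pv_fold_nodup _ _ (by rw [pv_initA_keys]; exact hMOnodup)
  have hGAitems : ((pvPairs tests).foldl pvStep pvInitA).items
      = (PySem.Set.update pvMODULE_ORDER mods).map g := by
    rw [PySem.Dict.items_eq_map_keys _ hGAnodup []]
    rw [pv_fold_keys, pv_initA_keys, hpairs_fst]
    apply List.map_congr_left; intro k _
    rw [pv_fold_getD, pv_initA_getD, List.nil_append, pv_group_eq]
    rfl
  have hbool : ∀ k, (!(tests.filter (fun t => pvKeyOf t == k)).isEmpty) = decide (k ∈ mods) := by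
    intro k
    by_cases hk : k ∈ mods
    · have hne : tests.filter (fun t => pvKeyOf t == k) ≠ [] :=
        fun hnil => (pv_group_eq_nil_iff tests k).mp hnil hk
      simp [hk, List.isEmpty_eq_false_iff, hne]
    · have hnil : tests.filter (fun t => pvKeyOf t == k) = [] := by
        by_contra hne
        exact hk (not_not.mp (fun hc => hne ((pv_group_eq_nil_iff tests k).mpr hc)))
      simp [hk, hnil]
  have hseen : PySem.Set.update ([] : List String) mods = PySem.Set.ofList mods := by
    rw [PySem.Set.update_nil_left]
  show ((List.foldl pvStep pvInitA (pvPairs tests)).items.filter (fun p => !p.2.isEmpty))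
      = (pvMODULE_ORDER.filter (fun m => (PySem.Set.update ([] : List String) mods).contains m)
          ++ (PySem.Set.update ([] : List String) mods).filter (fun m => !pvMODULE_ORDER.contains m)).map
          (fun m => (m, tests.filter (fun t => (PySem.Dict.ofList t).getD "module" "" == m)))
  rw [hseen, hGAitems]
  have hgfun : (fun m => (m, tests.filter (fun t => (PySem.Dict.ofList t).getD "module" "" == m))) = g := by
    funext m; rfl
  rw [hgfun]
  · rw [List.map_append]
    rw [PySem.Set.update_eq_append_filter, List.map_append, List.filter_append, List.filter_map]
    congr 1
    · congr 1
      apply List.filter_congr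
      intro k _
      show ((fun p => !p.2.isEmpty) ∘ g) k = ((PySem.Set.ofList mods).contains k)
      have : ((fun (p : String × List (List (String × String))) => !p.2.isEmpty) ∘ g) k
          = decide (k ∈ mods) := by
        simp only [Function.comp_apply, hgdef, pvG]
        exact hbool k
      rw [this]
      simp [PySem.Set.mem_ofList]
    · have hE : ((PySem.Set.ofList mods).filter (fun y => !(PySem.Set.contains pvMODULE_ORDER y))).filter
          ((fun (p : String × List (List (String × String))) => !p.2.isEmpty) ∘ g)
          = (PySem.Set.ofList mods).filter (fun y => !(PySem.Set.contains pvMODULE_ORDER y)) := by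
        apply List.filter_eq_self.mpr
        intro k hk
        have hkmods : k ∈ mods := (PySem.Set.mem_ofList _ _).mp (List.mem_of_mem_filter hk)
        show ((fun (p : String × List (List (String × String))) => !p.2.isEmpty) ∘ g) k = true
        simp only [Function.comp_apply, hgdef, pvG]
        rw [hbool k]; simpa using hkmods
      rw [List.filter_map, hE]
      first
      | rfl
      | (congr 1
         apply List.filter_congr
         intro k _
         rw [PySem.Set.contains_eq_listContains])
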